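-- pv_equiv track=rewrite | github.com/HanSeongDeok/before-dinner-algorithm | han_project/week13/week13-과일장수.py | solution
-- ===== SOURCE A (Python) =====
-- def solution(k, m, score):
--     if len(score) < m:
--         return 0
--     score = sorted(score, reverse=True)
--     cnt = 0
--     for i in range(0, len(score), m):
--         if(i+m > len(score)):
--             break
--         cnt += min(score[i:i+m]) * m
--     return cnt
-- ===== SOURCE B (Python) =====
-- def solution(k, m, score):
--     counts = {}
--     for v in score:
--         counts[v] = counts.get(v, 0) + 1
--     q = len(score) // m
--     if q <= 0:
--         return 0
--     total = 0
--     c = 0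
--     for v in sorted(counts, reverse=True):
--         c2 = c + counts[v]
--         total += v * (min(c2 // m, q) - min(c // m, q))
--         c = c2
--     return total * m
-- ===== Notes on version B (the rewrite author's own statement) =====
-- stated objective: alternative
-- what changed: B never forms or scans groups: it builds a value->frequency dict in one pass, walks the distinct values in descending order once, and for each value computes by rank arithmetic (floor divisions of the cumulative count) how many group minima fall inside that value's run, instead of A's descending sort of all elements with a min() scan over each m-slice.
import Mathlib
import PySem

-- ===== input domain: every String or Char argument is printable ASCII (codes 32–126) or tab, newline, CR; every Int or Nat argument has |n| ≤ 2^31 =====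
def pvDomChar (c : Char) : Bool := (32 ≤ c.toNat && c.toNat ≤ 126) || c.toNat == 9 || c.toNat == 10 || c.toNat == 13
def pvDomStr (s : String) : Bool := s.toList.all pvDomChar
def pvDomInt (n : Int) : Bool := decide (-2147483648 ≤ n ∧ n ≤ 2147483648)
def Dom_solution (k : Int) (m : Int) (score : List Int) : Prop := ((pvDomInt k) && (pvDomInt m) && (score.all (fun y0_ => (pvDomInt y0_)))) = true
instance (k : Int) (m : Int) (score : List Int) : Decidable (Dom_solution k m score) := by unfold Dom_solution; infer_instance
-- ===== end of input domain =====

-- B replaces A's sort + per-m-group min() scan by a value->frequency dict walked once over the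
-- distinct values in descending order, counting each value's group minima by rank arithmetic
-- (objective: alternative).

-- ===== PORT A =====
-- min() of the slice: Python raises on an empty list, but inside Pre_ (m ≠ 0) the slice is
-- nonempty whenever this branch runs, so `.getD 0` is never the default there.
def solution (k : Int) (m : Int) (score : List Int) : Int :=
  if (score.length : Int) < m then 0
  else
    let s := PySem.List.sorted score (fun x => x) true
    ((PySem.List.pyRange 0 (s.length : Int) m).foldl
      (fun (st : Bool × Int) i =>
        if st.1 then st
        else if (s.length : Int) < i + m then (true, st.2)
        else (st.1, st.2 + (PySem.List.min? (PySem.List.slice s (some i) (some (i + m))) (fun x => x)).getD 0 * m))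
      (false, 0)).2

-- ===== PORT B =====
-- counts[v] in the loop: v ranges over counts' own keys, so the key is always present and
-- `getD v 0` is exact there.
def solution_alt (k : Int) (m : Int) (score : List Int) : Int :=
  let counts := score.foldl (fun d v => d.insert v (d.getD v 0 + 1)) PySem.Dict.empty
  let q := PySem.Int.floordiv (score.length : Int) m
  if q ≤ 0 then 0
  else
    ((PySem.List.sorted counts.keys (fun x => x) true).foldl
      (fun (st : Int × Int) v =>
        let c2 := st.2 + counts.getD v 0
        (st.1 + v * (min (PySem.Int.floordiv c2 m) q - min (PySem.Int.floordiv st.2 m) q), c2))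
      (0, 0)).1 * m

-- ===== PRECONDITION & SPEC =====
-- Pre_ excludes only m = 0, where Python A raises ValueError (range step 0) and B raises ZeroDivisionError.
def Pre_solution (k : Int) (m : Int) (score : List Int) : Prop := m ≠ 0
instance (k : Int) (m : Int) (score : List Int) : Decidable (Pre_solution k m score) := by unfold Pre_solution; infer_instance
def pvWitness_solution : Int × Int × List Int := (0, 2, [1, 2, 3])

def Spec_solution (k : Int) (m : Int) (score : List Int) (out : Int) : Prop := out = solution_alt k m score
instance (k : Int) (m : Int) (score : List Int) (out : Int) : Decidable (Spec_solution k m score out) := by unfold Spec_solution; infer_instance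

-- ===== CLAIM (what is proved, stated in full; the proofs are below) =====
def Claim_equal_solution : Prop := ∀ (k : Int) (m : Int) (score : List Int), Dom_solution k m score → Pre_solution k m score → Spec_solution k m score (solution k m score)

-- ===== LEMMAS AND PROOFS =====

-- descending sort of ints = reverse of ascending sort
lemma sorted_rev_eq_reverse (xs : List Int) :
    PySem.List.sorted xs (fun x => x) true = (PySem.List.sorted xs (fun x => x) false).reverse := by
  refine List.Perm.eq_of_pairwise (le := fun a b : Int => b ≤ a)
    (fun a b _ _ h1 h2 => by omega)
    (PySem.List.sorted_pairwise_rev xs (fun x => x))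
    ((List.pairwise_reverse).2 (by simpa using PySem.List.sorted_pairwise xs (fun x => x)))
    ((PySem.List.sorted_perm xs (fun x => x) true).trans
      ((PySem.List.sorted_perm xs (fun x => x) false).symm.trans (List.reverse_perm _).symm))

-- pyRange with a negative step and nonnegative stop is empty
lemma pyRange_neg_step_empty (n m : Int) (hn : 0 ≤ n) (hm : m < 0) : PySem.List.pyRange 0 n m = [] := by
  unfold PySem.List.pyRange
  rw [if_neg (by omega), if_neg (by omega), if_neg (by omega)]
  simp

-- floor division of a nonnegative number by a negative one is nonpositive
lemma floordiv_nonpos (a b : Int) (ha : 0 ≤ a) (hb : b < 0) : PySem.Int.floordiv a b ≤ 0 := by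
  unfold PySem.Int.floordiv
  rw [Int.fdiv_eq_ediv]
  have : a / b ≤ 0 := Int.ediv_nonpos_of_nonneg_of_nonpos ha (by omega)
  split_ifs <;> omega

-- A's loop: while no element triggers the break, the fold accumulates the sum
lemma fold_no_break (P : Int → Prop) [DecidablePred P] (h : Int → Int) (l : List Int) (c : Int)
    (hl : ∀ i ∈ l, ¬ P i) :
    l.foldl (fun (st : Bool × Int) i =>
      if st.1 then st else if P i then (true, st.2) else (st.1, st.2 + h i)) (false, c)
      = (false, c + (l.map h).sum) := by
  induction l generalizing c with
  | nil => simp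
  | cons x t ih =>
    have hx : ¬ P x := hl x (by simp)
    simp only [List.foldl_cons, List.map_cons, List.sum_cons]
    rw [if_neg (by simp), if_neg hx]
    rw [ih (c + h x) (fun i hi => hl i (by simp [hi]))]
    simp; ring

-- value of A's break-guarded stepped loop in the main case (mm ≤ length)
lemma A_loop (s : List Int) (mm : Nat) (hmm : 0 < mm) (hge : mm ≤ s.length) (h : Int → Int) :
    ((PySem.List.pyRange 0 (s.length : Int) (mm:Int)).foldl
      (fun (st : Bool × Int) i =>
        if st.1 then st
        else if (s.length : Int) < i + (mm:Int) then (true, st.2)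
        else (st.1, st.2 + h i))
      (false, 0)).2
    = ∑ t ∈ Finset.range (s.length / mm), h ((mm:Int) * (t:Nat)) := by
  set n := s.length with hn
  set Q := n / mm with hQdef
  set R := n % mm with hRdef
  have hQ1 : 1 ≤ Q := (Nat.one_le_div_iff hmm).mpr hge
  have hdm : n = mm * Q + R := (Nat.div_add_mod n mm).symm
  have hRlt : R < mm := Nat.mod_lt _ hmm
  have hrange : PySem.List.pyRange 0 (n : Int) (mm:Int)
      = (List.range ((n + mm - 1)/mm)).map (fun t => (0:Int) + (mm:Int) * (t:Nat)) := by
    rw [PySem.List.pyRange_of_pos 0 (n:Int) (by exact_mod_cast hmm)]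
    congr 2
    rw [if_pos (by exact_mod_cast (by omega : 0 < n))]
    have e : ((n:Int) - 0 + (mm:Int) - 1) = ((n + mm - 1 : Nat) : Int) := by omega
    rw [e, ← Int.natCast_div]
    exact Int.toNat_natCast _
  rw [hrange]
  have hnb : ∀ t : Nat, t < Q → ¬ ((n:Int) < ((0:Int) + (mm:Int) * (t:Nat)) + (mm:Int)) := by
    intro t ht
    have h1 : mm * t + mm ≤ n := by
      have h2 : mm * (t+1) ≤ mm * Q := Nat.mul_le_mul_left mm (by omega)
      have h3 : mm * (t+1) = mm * t + mm := by ring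
      generalize mm * Q = P at h2 hdm
      omega
    have h4 : ((mm * t + mm : Nat) : Int) = ((0:Int) + (mm:Int) * (t:Nat)) + (mm:Int) := by push_cast; ring
    rw [← h4]
    exact_mod_cast Nat.not_lt.mpr h1
  by_cases hR0 : R = 0
  · have hN : (n + mm - 1)/mm = Q := by
      have e : n + mm - 1 = mm * Q + (mm - 1) := by
        generalize mm * Q = P at hdm ⊢; omega
      rw [e, Nat.mul_add_div hmm, Nat.div_eq_of_lt (by omega)]
      omega
    rw [hN, fold_no_break _ h _ 0 (by
      intro i hi
      obtain ⟨t, ht, rfl⟩ := List.mem_map.mp hi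
      exact hnb t (List.mem_range.mp ht))]
    simp only [zero_add]
    rw [List.map_map]
    rfl
  · have hN : (n + mm - 1)/mm = Q + 1 := by
      have e : n + mm - 1 = mm * Q + (R + mm - 1) := by
        generalize mm * Q = P at hdm ⊢; omega
      rw [e, Nat.mul_add_div hmm]
      congr 1
      apply Nat.div_eq_of_lt_le <;> omega
    rw [hN, List.range_succ, List.map_append, List.foldl_append]
    rw [fold_no_break _ h _ 0 (by
      intro i hi
      obtain ⟨t, ht, rfl⟩ := List.mem_map.mp hi
      exact hnb t (List.mem_range.mp ht))]
    simp only [List.map_cons, List.map_nil, List.foldl_cons, List.foldl_nil]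
    rw [if_neg (by simp), if_pos (by
      have h4 : ((mm * Q + R : Nat) : Int) < ((0:Int) + (mm:Int) * (Q:Nat)) + (mm:Int) := by
        push_cast
        have : (R:Int) < (mm:Int) := by exact_mod_cast hRlt
        nlinarith [this]
      rw [hn] at hdm ⊢
      calc ((s.length:Nat) : Int) = ((mm * Q + R : Nat) : Int) := by exact_mod_cast hdm
        _ < _ := h4)]
    simp only [zero_add]
    rw [List.map_map]
    rfl

-- min of the reverse of a nonempty ascending list is its head
lemma min_rev_sorted (u : List Int) (hu : u ≠ []) (hs : u.Pairwise (· ≤ ·)) :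
    (PySem.List.min? u.reverse (fun x => x)).getD 0 = u.headD 0 := by
  obtain ⟨c, t, rfl⟩ := List.exists_cons_of_ne_nil hu
  have hne : (c :: t).reverse ≠ [] := by simp
  obtain ⟨v, hv⟩ : ∃ v, PySem.List.min? ((c :: t).reverse) (fun x => x) = some v := by
    cases h : PySem.List.min? ((c :: t).reverse) (fun x => x) with
    | none => exact absurd ((PySem.List.min?_eq_none_iff _ _).mp h) hne
    | some v => exact ⟨v, rfl⟩
  have hvm : v ∈ (c :: t) := by
    have := PySem.List.min?_mem hv
    rw [List.mem_reverse] at this; exact this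
  have hmin := PySem.List.min?_isMin hv
  have h1 : v ≤ c := hmin c (by simp)
  have h2 : c ≤ v := by
    rcases List.mem_cons.mp hvm with h | h
    · omega
    · exact (List.pairwise_cons.mp hs).1 v h
  rw [hv]; simp; omega

-- the minimum of the t-th descending group is an indexed element of the ascending list
lemma group_min (s : List Int) (mm Q R t : Nat) (hmm : 0 < mm) (hs : s.Pairwise (· ≤ ·))
    (hlen : s.length = mm * Q + R) (hR : R < mm) (ht : t < Q) :
    (PySem.List.min? (PySem.List.slice s.reverse (some ((mm*t : Nat) : Int)) (some ((mm*t+mm : Nat) : Int))) (fun x => x)).getD 0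
      = s.getD (R + (Q-1-t)*mm) 0 := by
  rcases Nat.exists_eq_add_of_lt ht with ⟨d, rfl⟩
  have hQ1 : t + d + 1 - 1 - t = d := by omega
  rw [hQ1]
  have hx : mm * (t + d + 1) = mm*t + mm*d + mm := by ring
  set b := R + d * mm with hbdef
  have hdm : b = R + mm*d := by rw [hbdef]; ring
  have hb1 : b + mm ≤ s.length := by omega
  have hb3 : mm*t ≤ s.length := by omega
  rw [PySem.List.slice_natCast]
  have e1 : mm*t + mm - mm*t = mm := by omega
  rw [e1]
  have step1 : List.drop (mm*t) s.reverse = (List.take (s.length - mm*t) s).reverse := by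
    rw [List.reverse_take]
    congr 1; omega
  have lt1 : (List.take (s.length - mm*t) s).length = s.length - mm*t := by
    rw [List.length_take]; omega
  have step2 : List.take mm ((List.take (s.length - mm*t) s).reverse)
      = (List.drop b (List.take (s.length - mm*t) s)).reverse := by
    rw [List.reverse_drop, lt1]
    congr 1; omega
  have step3 : List.drop b (List.take (s.length - mm*t) s) = List.take mm (List.drop b s) := by
    rw [List.drop_take]
    congr 1; omega
  rw [step1, step2, step3]
  have hu : List.take mm (List.drop b s) ≠ [] := by
    have hl : (List.take mm (List.drop b s)).length = mm := by
      rw [List.length_take, List.length_drop]; omega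
    intro h; rw [h] at hl; simp at hl; omega
  have hsub : (List.take mm (List.drop b s)).Sublist s :=
    (List.take_sublist _ _).trans (List.drop_sublist _ _)
  rw [min_rev_sorted _ hu (hs.sublist hsub)]
  cases hd : List.drop b s with
  | nil => exact absurd (by rw [hd]; simp) hu
  | cons x xs =>
    obtain ⟨mm', rfl⟩ : ∃ mm', mm = mm' + 1 := ⟨mm - 1, by omega⟩
    have hx' : s[b]? = some x := by
      rw [← List.head?_drop, hd]; rfl
    simp [List.getD_eq_getElem?_getD, hx']

-- count of a value in a flatMap of replicates over a nodup list
lemma count_flatMap_replicate (vs : List Int) (cf : Int → Nat) (hnd : vs.Nodup) (a : Int) :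
    (vs.flatMap (fun v => List.replicate (cf v) v)).count a = if a ∈ vs then cf a else 0 := by
  induction vs with
  | nil => simp
  | cons v t ih =>
    rw [List.flatMap_cons, List.count_append, List.count_replicate,
      ih (List.nodup_cons.mp hnd).2]
    have hvt : v ∉ t := (List.nodup_cons.mp hnd).1
    by_cases hav : a = v
    · subst hav; simp [hvt]
    · simp [hav, Ne.symm hav]

-- flatMap of replicates over a ≤-sorted list is ≤-sorted
lemma pairwise_flatMap_replicate (vs : List Int) (cf : Int → Nat)
    (hp : vs.Pairwise (· ≤ ·)) :
    (vs.flatMap (fun v => List.replicate (cf v) v)).Pairwise (· ≤ ·) := by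
  induction vs with
  | nil => simp
  | cons v t ih =>
    rw [List.flatMap_cons, List.pairwise_append]
    refine ⟨List.pairwise_replicate.mpr (Or.inr le_rfl), ih (List.pairwise_cons.mp hp).2, ?_⟩
    intro a ha b hb
    rw [List.eq_of_mem_replicate ha]
    obtain ⟨w, hw, hbw⟩ := List.mem_flatMap.mp hb
    rw [List.eq_of_mem_replicate hbw]
    exact (List.pairwise_cons.mp hp).1 w hw

-- the ascending sort is the flatMap of per-distinct-value runs
lemma asc_eq_flatMap (score : List Int) :
    PySem.List.sorted score (fun x => x) false
      = (PySem.List.sorted (PySem.Set.ofList score) (fun x => x) false).flatMap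
          (fun v => List.replicate (score.count v) v) := by
  set vs := PySem.List.sorted (PySem.Set.ofList score) (fun x => x) false with hvs
  have hnd : vs.Nodup :=
    ((PySem.List.sorted_perm _ _ _).nodup_iff).mpr (PySem.Set.nodup_ofList score)
  have hmem : ∀ a : Int, a ∈ vs ↔ a ∈ score := by
    intro a
    rw [hvs, PySem.List.mem_sorted, PySem.Set.mem_ofList]
  have hperm : (vs.flatMap (fun v => List.replicate (score.count v) v)).Perm score := by
    rw [List.perm_iff_count]
    intro a
    rw [count_flatMap_replicate vs _ hnd a]
    by_cases h : a ∈ score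
    · rw [if_pos ((hmem a).mpr h)]
    · rw [if_neg (fun hv => h ((hmem a).mp hv)), eq_comm, List.count_eq_zero]
      exact h
  have hpw : (vs.flatMap (fun v => List.replicate (score.count v) v)).Pairwise (· ≤ ·) :=
    pairwise_flatMap_replicate vs _ (by
      simpa using PySem.List.sorted_pairwise (PySem.Set.ofList score) (fun x => x))
  exact PySem.List.sorted_id_eq_of_perm_of_pairwise score (vs.flatMap (fun v => List.replicate (score.count v) v)) hperm hpw

-- getD of a reverse
lemma getD_reverse (s : List Int) (p : Nat) (hp : p < s.length) :
    s.reverse.getD p 0 = s.getD (s.length - 1 - p) 0 := by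
  have h1 : p < s.reverse.length := by simpa using hp
  rw [List.getD_eq_getElem _ _ h1, List.getD_eq_getElem _ _ (by omega),
    List.getElem_reverse]

-- B's loop over descending runs computes the sum of the group minima by rank arithmetic
lemma fold_core (mm Q : Nat) (hmm : 0 < mm) (cf : Int → Nat) (desc : List Int)
    (ks : List Int) (p : Nat) (t0 : Int)
    (hdec : desc.drop p = ks.flatMap (fun v => List.replicate (cf v) v)) :
    (ks.foldl
      (fun (st : Int × Int) v =>
        (st.1 + v * (min (PySem.Int.floordiv (st.2 + (cf v : Int)) (mm:Int)) ((Q:Int))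
                     - min (PySem.Int.floordiv st.2 (mm:Int)) ((Q:Int))), st.2 + (cf v : Int)))
      (t0, (p:Int))).1
    = t0 + ∑ x ∈ Finset.Ico (min (p / mm) Q) (min (desc.length / mm) Q),
        desc.getD ((x+1)*mm - 1) 0 := by
  induction ks generalizing p t0 with
  | nil =>
    have hlen : desc.length ≤ p := by
      have h : desc.length - p = 0 := by
        simpa using congrArg List.length hdec
      omega
    have : min (desc.length / mm) Q ≤ min (p / mm) Q :=
      min_le_min (Nat.div_le_div_right hlen) le_rfl
    rw [Finset.Ico_eq_empty (not_lt.mpr this)]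
    simp
  | cons v t ih =>
    rcases Nat.lt_or_ge desc.length p with hpg | hlenp
    · -- the list is already exhausted: this run is empty and nothing changes
      have hnil : desc.drop p = [] := List.drop_eq_nil_of_le (le_of_lt hpg)
      rw [hnil] at hdec
      have hsplit := List.append_eq_nil_iff.mp hdec.symm
      have hcf : cf v = 0 := by
        have := congrArg List.length hsplit.1
        simpa using this
      simp only [List.foldl_cons, hcf, Nat.cast_zero, add_zero, sub_self, mul_zero]
      exact ih p t0 (by rw [hnil]; exact hsplit.2.symm)
    have hdec' : desc.drop (p + cf v) = t.flatMap (fun v => List.replicate (cf v) v) := by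
      rw [← List.drop_drop, hdec, List.flatMap_cons, List.drop_left' (by simp)]
    have hlenp' : p + cf v ≤ desc.length := by
      have := congrArg List.length hdec
      rw [List.length_drop, List.flatMap_cons, List.length_append, List.length_replicate] at this
      omega
    simp only [List.foldl_cons]
    have hc : (p:Int) + (cf v : Int) = ((p + cf v : Nat) : Int) := by push_cast; ring
    rw [hc]
    rw [ih (p + cf v) _ hdec']
    -- turn the step's Int arithmetic into Nat arithmetic
    have hfd : ∀ a : Nat, PySem.Int.floordiv ((a:Nat):Int) ((mm:Nat):Int) = ((a / mm : Nat) : Int) :=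
      fun a => PySem.Int.floordiv_natCast a mm
    rw [hfd, hfd]
    have hmin : ∀ a : Nat, min ((a / mm : Nat) : Int) ((Q:Nat):Int) = ((min (a / mm) Q : Nat) : Int) := by
      intro a; rw [Nat.cast_min]
    rw [hmin, hmin]
    -- split the Ico at min ((p + cf v)/mm) Q
    have h1 : min (p / mm) Q ≤ min ((p + cf v) / mm) Q :=
      min_le_min (Nat.div_le_div_right (by omega)) le_rfl
    have h2 : min ((p + cf v) / mm) Q ≤ min (desc.length / mm) Q :=
      min_le_min (Nat.div_le_div_right hlenp') le_rfl
    rw [← Finset.sum_Ico_consecutive _ h1 h2]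
    -- the first chunk is constantly v
    have hconst : ∀ x ∈ Finset.Ico (min (p / mm) Q) (min ((p + cf v) / mm) Q),
        desc.getD ((x+1)*mm - 1) 0 = v := by
      intro x hx
      obtain ⟨hx1, hx2⟩ := Finset.mem_Ico.mp hx
      have hxQ : x < Q := lt_of_lt_of_le hx2 (min_le_right _ _)
      have hxlo : p / mm ≤ x := by
        rcases Nat.lt_or_ge (p / mm) Q with h | h
        · rwa [min_eq_left (by omega)] at hx1
        · omega
      have hxhi : x < (p + cf v) / mm := lt_of_lt_of_le hx2 (min_le_left _ _)
      have hge : p ≤ (x+1)*mm - 1 := by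
        have e1 : p / mm * mm + p % mm = p := by
          rw [Nat.mul_comm]; exact Nat.div_add_mod p mm
        have e2 : p % mm < mm := Nat.mod_lt p hmm
        have h3 : p < (p / mm + 1) * mm := by
          rw [Nat.add_mul, one_mul]; omega
        have h4 : (p / mm + 1) * mm ≤ (x+1)*mm := Nat.mul_le_mul_right mm (by omega)
        omega
      have hlt : (x+1)*mm - 1 < p + cf v := by
        have h3 : (x+1)*mm ≤ ((p + cf v) / mm) * mm := Nat.mul_le_mul_right mm (by omega)
        have h4 : ((p + cf v) / mm) * mm ≤ p + cf v := Nat.div_mul_le_self _ _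
        have h5 : 0 < (x+1)*mm := Nat.mul_pos (by omega) hmm
        omega
      -- the element at that rank is v
      have hidx : (x+1)*mm - 1 - p < cf v := by omega
      have : desc.getD ((x+1)*mm - 1) 0 = (desc.drop p).getD ((x+1)*mm - 1 - p) 0 := by
        rw [List.getD_eq_getElem?_getD, List.getD_eq_getElem?_getD, List.getElem?_drop]
        congr 1
        congr 1
        omega
      rw [this, hdec, List.flatMap_cons, List.getD_eq_getElem?_getD,
        List.getElem?_append_left (by simpa using hidx)]
      simp [hidx]
    rw [Finset.sum_congr rfl hconst, Finset.sum_const, Nat.card_Ico, nsmul_eq_mul]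
    push_cast [Nat.cast_sub h1]
    ring

-- ===== VERDICT (by name: the statement is the Claim_ definition above) =====
theorem solution_spec : Claim_equal_solution := by
  intro k m score _ hm
  unfold Spec_solution solution solution_alt
  dsimp only
  unfold Pre_solution at hm
  simp only [PySem.Dict.foldl_insert_getD_add_one_eq_counter, PySem.Dict.getD_counter,
    PySem.Dict.keys_counter]
  rcases lt_trichotomy m 0 with hneg | hz | hpos
  · -- negative m: A's range is empty, B's group count is nonpositive — both return 0
    rw [if_neg (by
      have : (0:Int) ≤ (score.length : Int) := by positivity
      omega)]
    have hlen : ((PySem.List.sorted score (fun x => x) true).length : Int) = (score.length : Int) := by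
      rw [PySem.List.length_sorted]
    rw [hlen, pyRange_neg_step_empty _ _ (by positivity) hneg]
    have hq : PySem.Int.floordiv (score.length : Int) m ≤ 0 :=
      floordiv_nonpos _ _ (by positivity) hneg
    rw [if_pos hq]
    rfl
  · exact absurd hz hm
  · obtain ⟨mm, rfl⟩ : ∃ mm : Nat, m = (mm:Int) := ⟨m.toNat, by omega⟩
    have hmm : 0 < mm := by exact_mod_cast hpos
    by_cases hlt : score.length < mm
    · -- fewer scores than a group: A returns at the guard, B's group count is 0
      rw [if_pos (by exact_mod_cast hlt)]
      have hq : PySem.Int.floordiv (score.length : Int) (mm:Int) ≤ 0 := by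
        rw [show ((score.length : Int)) = ((score.length : Nat) : Int) from rfl]
        rw [PySem.Int.floordiv_natCast]
        exact_mod_cast Nat.le_of_eq (Nat.div_eq_of_lt hlt)
      rw [if_pos hq]
    · -- main case
      have hge : mm ≤ score.length := by omega
      rw [if_neg (by exact_mod_cast hlt)]
      set n := score.length with hn
      set Q := n / mm with hQdef
      set R := n % mm with hRdef
      have hQ1 : 1 ≤ Q := (Nat.one_le_div_iff hmm).mpr hge
      have hdm : n = mm * Q + R := (Nat.div_add_mod n mm).symm
      have hRlt : R < mm := Nat.mod_lt _ hmm
      have hq : PySem.Int.floordiv (n : Int) (mm:Int) = (Q:Int) := by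
        exact_mod_cast PySem.Int.floordiv_natCast n mm
      rw [hq, if_neg (show ¬ (Q:Int) ≤ 0 by exact_mod_cast (by omega : ¬ Q ≤ 0))]
      set s := PySem.List.sorted score (fun x => x) with hsdef
      have hslen : s.length = n := PySem.List.length_sorted _ _ _
      have hrevlen : (s.reverse).length = n := by rw [List.length_reverse, hslen]
      -- ===== A-side: the loop is the sum of the per-group minima =====
      rw [sorted_rev_eq_reverse, ← hsdef]
      have hA := A_loop s.reverse mm hmm (by omega : mm ≤ (s.reverse).length)
        (fun i => (PySem.List.min? (PySem.List.slice s.reverse (some i) (some (i + (mm:Int)))) (fun x => x)).getD 0 * (mm:Int))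
      rw [hrevlen] at hA
      rw [hrevlen, hA]
      have hterm : ∀ t ∈ Finset.range Q,
          (PySem.List.min? (PySem.List.slice s.reverse (some ((mm:Int) * (t:Nat))) (some ((mm:Int) * (t:Nat) + (mm:Int)))) (fun x => x)).getD 0 * (mm:Int)
            = s.getD (R + (Q-1-t)*mm) 0 * (mm:Int) := by
        intro t ht
        have ht' : t < Q := Finset.mem_range.mp ht
        have c1 : (mm:Int) * (t:Nat) = ((mm*t : Nat) : Int) := by push_cast; ring
        have c2 : ((mm*t : Nat) : Int) + (mm:Int) = ((mm*t+mm : Nat) : Int) := by push_cast; ring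
        rw [c1, c2, group_min s mm Q R t hmm (PySem.List.sorted_pairwise score (fun x => x))
          (by rw [hslen]; exact hdm) hRlt ht']
      rw [Finset.sum_congr rfl hterm]
      -- ===== B-side: the run-walk computes the same sum =====
      set vs := PySem.List.sorted (PySem.Set.ofList score) (fun x => x) false with hvs
      have hdesc : s.reverse = vs.reverse.flatMap (fun v => List.replicate (score.count v) v) := by
        rw [hsdef]
        conv_lhs => rw [show PySem.List.sorted score (fun x => x) = PySem.List.sorted score (fun x => x) false from rfl]
        rw [asc_eq_flatMap score, ← hvs, List.reverse_flatMap]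
        congr 1
        funext v
        simp [Function.comp, List.reverse_replicate]
      have hB := fold_core mm Q hmm (fun v => score.count v) s.reverse vs.reverse 0 0
        (by simpa using hdesc)
      rw [sorted_rev_eq_reverse (PySem.Set.ofList score), ← hvs]
      simp only [Nat.cast_zero] at hB
      rw [hB, hrevlen]
      rw [Nat.zero_div, Nat.min_eq_left (by omega), ← hQdef, Nat.min_eq_left le_rfl,
        Nat.Ico_zero_eq_range, zero_add]
      -- identify the terms: the (j+1)m-th descending rank is the (R + (Q-1-j)m)-th ascending one
      rw [Finset.sum_mul]
      refine Finset.sum_congr rfl (fun j hj => ?_)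
      have hj' : j < Q := Finset.mem_range.mp hj
      have h7 : Q * mm = mm * Q := Nat.mul_comm _ _
      have h9 : (Q - 1 - j) * mm + mm + j * mm = Q * mm := by
        have he : (Q - 1 - j) + 1 + j = Q := by omega
        calc (Q - 1 - j) * mm + mm + j * mm = ((Q - 1 - j) + 1 + j) * mm := by ring
          _ = Q * mm := by rw [he]
      have h10 : (j + 1) * mm = j * mm + mm := by ring
      have hpos' : (j + 1) * mm - 1 < n := by
        have h3 : (j + 1) * mm ≤ Q * mm := Nat.mul_le_mul_right mm (by omega)
        omega
      rw [getD_reverse s _ (by rw [hslen]; exact hpos')]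
      congr 2
      rw [hslen]
      omega
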